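-- pv_equiv track=rewrite | github.com/jm-jung/Can_bit | src/events/classifier.py | _detect_related_symbols
-- ===== SOURCE A (Python) =====
-- from typing import Iterable, List, Optional
--
-- def _detect_related_symbols(keywords: Iterable[str]) -> List[str]:
--     lowered = {kw.lower() for kw in keywords}
--     symbols = {"BTC", "BTC-USD"}
--     if "tesla" in lowered:
--         symbols.add("TSLA")
--     if "fed" in lowered or "fomc" in lowered:
--         symbols.add("DXY")
--     return sorted(symbols)
-- ===== SOURCE B (Python) =====
-- from typing import Iterable, List
--
-- _KEYWORD_SYMBOL_MAP = {"tesla": "TSLA", "fed": "DXY", "fomc": "DXY"}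
--
-- def _detect_related_symbols(keywords: Iterable[str]) -> List[str]:
--     symbols = {"BTC", "BTC-USD"}
--     for kw in keywords:
--         sym = _KEYWORD_SYMBOL_MAP.get(kw.lower())
--         if sym is not None:
--             symbols.add(sym)
--     return sorted(symbols)
-- ===== Notes on version B (the rewrite author's own statement) =====
-- stated objective: idiomatic
-- what changed: Replaced the intermediate lowered-keyword set and fixed if-branches with a single data-driven pass over the keywords using a static keyword-to-symbol lookup table.
import Mathlib
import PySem

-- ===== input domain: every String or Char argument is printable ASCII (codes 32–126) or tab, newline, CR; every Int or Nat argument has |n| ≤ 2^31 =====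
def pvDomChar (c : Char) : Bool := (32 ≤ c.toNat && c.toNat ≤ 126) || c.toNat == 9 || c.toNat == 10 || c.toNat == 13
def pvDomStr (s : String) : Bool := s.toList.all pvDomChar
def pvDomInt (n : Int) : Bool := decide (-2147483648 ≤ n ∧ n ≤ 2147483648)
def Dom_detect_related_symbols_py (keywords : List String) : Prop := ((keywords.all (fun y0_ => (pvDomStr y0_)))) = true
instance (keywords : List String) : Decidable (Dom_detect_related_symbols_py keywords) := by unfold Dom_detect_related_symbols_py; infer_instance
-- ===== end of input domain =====

-- B replaces the lowered-keyword set and the fixed if-branches with one data-driven pass over a static keyword→symbol table (objective: idiomatic).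

-- ===== PORT A =====
def detect_related_symbols_py (keywords : List String) : List String :=
  let lowered : PySem.Set String := PySem.Set.ofList (keywords.map PySem.Str.lower)
  let symbols0 : PySem.Set String := PySem.Set.ofList ["BTC", "BTC-USD"]
  let symbols1 : PySem.Set String :=
    if "tesla" ∈ lowered then PySem.Set.add symbols0 "TSLA" else symbols0
  let symbols2 : PySem.Set String :=
    if "fed" ∈ lowered ∨ "fomc" ∈ lowered then PySem.Set.add symbols1 "DXY" else symbols1
  PySem.List.sorted symbols2 (fun x => x) false

-- ===== PORT B =====
def pvSymbolMap : PySem.Dict String String :=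
  PySem.Dict.ofList [("tesla", "TSLA"), ("fed", "DXY"), ("fomc", "DXY")]

def detect_related_symbols_py_alt (keywords : List String) : List String :=
  let syms : PySem.Set String := keywords.foldl (fun acc kw =>
      match PySem.Dict.get? pvSymbolMap (PySem.Str.lower kw) with
      | some s => PySem.Set.add acc s
      | none   => acc) (PySem.Set.ofList ["BTC", "BTC-USD"])
  PySem.List.sorted syms (fun x => x) false

-- ===== PRECONDITION & SPEC =====
def Spec_detect_related_symbols_py (keywords : List String) (out : List String) : Prop := out = detect_related_symbols_py_alt keywords
instance (keywords : List String) (out : List String) : Decidable (Spec_detect_related_symbols_py keywords out) := by unfold Spec_detect_related_symbols_py; infer_instance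

-- ===== CLAIM (what is proved, stated in full; the proofs are below) =====
def Claim_equal_detect_related_symbols_py : Prop := ∀ (keywords : List String), Dom_detect_related_symbols_py keywords → Spec_detect_related_symbols_py keywords (detect_related_symbols_py keywords)

-- ===== LEMMAS AND PROOFS =====

-- the loop body of B's port, named so the lemmas below can speak about the fold
def pvStep (acc : PySem.Set String) (kw : String) : PySem.Set String :=
  match PySem.Dict.get? pvSymbolMap (PySem.Str.lower kw) with
  | some s => PySem.Set.add acc s
  | none   => acc

lemma pvMap_get?_iff (s x : String) :
    PySem.Dict.get? pvSymbolMap s = some x ↔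
      (s = "tesla" ∧ x = "TSLA") ∨ (s = "fed" ∧ x = "DXY") ∨ (s = "fomc" ∧ x = "DXY") := by
  have hitems : pvSymbolMap.items = [("tesla", "TSLA"), ("fed", "DXY"), ("fomc", "DXY")] := by decide
  simp only [PySem.Dict.get?, hitems, List.find?]
  rcases eq_or_ne s "tesla" with rfl | h1
  · simp [eq_comm]
  · rcases eq_or_ne s "fed" with rfl | h2
    · simp [eq_comm]
    · rcases eq_or_ne s "fomc" with rfl | h3
      · simp [eq_comm]
      · simp [beq_eq_false_iff_ne.mpr (Ne.symm h1), beq_eq_false_iff_ne.mpr (Ne.symm h2),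
              beq_eq_false_iff_ne.mpr (Ne.symm h3), h1, h2, h3]

lemma pvFold_nodup (kws : List String) (acc : PySem.Set String) (h : acc.Nodup) :
    (kws.foldl pvStep acc).Nodup := by
  induction kws generalizing acc with
  | nil => exact h
  | cons kw t ih =>
    refine ih _ ?_
    unfold pvStep
    cases PySem.Dict.get? pvSymbolMap (PySem.Str.lower kw) with
    | none => exact h
    | some s => exact PySem.Set.nodup_add _ _ h

lemma pvFold_mem (kws : List String) (acc : PySem.Set String) (x : String) :
    x ∈ kws.foldl pvStep acc ↔
      x ∈ acc ∨ ∃ kw ∈ kws, PySem.Dict.get? pvSymbolMap (PySem.Str.lower kw) = some x := by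
  induction kws generalizing acc with
  | nil => simp
  | cons kw t ih =>
    simp only [List.foldl_cons, ih]
    unfold pvStep
    cases hg : PySem.Dict.get? pvSymbolMap (PySem.Str.lower kw) with
    | none =>
      constructor
      · rintro (h | ⟨k, hk, hs⟩)
        · exact Or.inl h
        · exact Or.inr ⟨k, List.mem_cons_of_mem _ hk, hs⟩
      · rintro (h | ⟨k, hk, hs⟩)
        · exact Or.inl h
        · rcases List.mem_cons.mp hk with rfl | hk
          · exact absurd hs (by simp [hg])
          · exact Or.inr ⟨k, hk, hs⟩
    | some s =>
      rw [PySem.Set.mem_add]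
      constructor
      · rintro ((h | rfl) | ⟨k, hk, hs⟩)
        · exact Or.inl h
        · exact Or.inr ⟨kw, List.mem_cons_self, hg⟩
        · exact Or.inr ⟨k, List.mem_cons_of_mem _ hk, hs⟩
      · rintro (h | ⟨k, hk, hs⟩)
        · exact Or.inl (Or.inl h)
        · rcases List.mem_cons.mp hk with rfl | hk
          · exact Or.inl (Or.inr (by rw [hg] at hs; exact ((Option.some.injEq _ _).mp hs.symm)))
          · exact Or.inr ⟨k, hk, hs⟩

-- ===== VERDICT (by name: the statement is the Claim_ definition above) =====
theorem detect_related_symbols_py_spec : Claim_equal_detect_related_symbols_py := by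
  intro keywords _
  unfold Spec_detect_related_symbols_py detect_related_symbols_py detect_related_symbols_py_alt
  simp only
  refine PySem.List.sorted_eq_sorted_of_perm _ _ _ (fun a b h => h) ?_
  have hT : ("tesla" ∈ PySem.Set.ofList (keywords.map PySem.Str.lower)) ↔
      ∃ kw ∈ keywords, PySem.Str.lower kw = "tesla" := by
    rw [PySem.Set.mem_ofList, List.mem_map]
  have hF : ("fed" ∈ PySem.Set.ofList (keywords.map PySem.Str.lower) ∨
             "fomc" ∈ PySem.Set.ofList (keywords.map PySem.Str.lower)) ↔
      ∃ kw ∈ keywords, PySem.Str.lower kw = "fed" ∨ PySem.Str.lower kw = "fomc" := by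
    rw [PySem.Set.mem_ofList, PySem.Set.mem_ofList, List.mem_map, List.mem_map]
    constructor
    · rintro (⟨k, hk, hl⟩ | ⟨k, hk, hl⟩)
      · exact ⟨k, hk, Or.inl hl⟩
      · exact ⟨k, hk, Or.inr hl⟩
    · rintro ⟨k, hk, hl | hl⟩
      · exact Or.inl ⟨k, hk, hl⟩
      · exact Or.inr ⟨k, hk, hl⟩
  have hAnodup :
      (if "fed" ∈ PySem.Set.ofList (keywords.map PySem.Str.lower) ∨
          "fomc" ∈ PySem.Set.ofList (keywords.map PySem.Str.lower) then
        PySem.Set.add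
          (if "tesla" ∈ PySem.Set.ofList (keywords.map PySem.Str.lower) then
            PySem.Set.add (PySem.Set.ofList ["BTC", "BTC-USD"]) "TSLA"
          else PySem.Set.ofList ["BTC", "BTC-USD"]) "DXY"
      else
        if "tesla" ∈ PySem.Set.ofList (keywords.map PySem.Str.lower) then
          PySem.Set.add (PySem.Set.ofList ["BTC", "BTC-USD"]) "TSLA"
        else PySem.Set.ofList ["BTC", "BTC-USD"]).Nodup := by
    split_ifs <;> first
      | exact PySem.Set.nodup_ofList _
      | exact PySem.Set.nodup_add _ _ (PySem.Set.nodup_ofList _)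
      | exact PySem.Set.nodup_add _ _ (PySem.Set.nodup_add _ _ (PySem.Set.nodup_ofList _))
  refine (List.perm_ext_iff_of_nodup hAnodup
    (pvFold_nodup keywords _ (PySem.Set.nodup_ofList _))).mpr ?_
  intro x
  rw [pvFold_mem]
  have hBside : (∃ kw ∈ keywords, PySem.Dict.get? pvSymbolMap (PySem.Str.lower kw) = some x) ↔
      ((∃ kw ∈ keywords, PySem.Str.lower kw = "tesla") ∧ x = "TSLA") ∨
      ((∃ kw ∈ keywords, PySem.Str.lower kw = "fed" ∨ PySem.Str.lower kw = "fomc") ∧ x = "DXY") := by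
    constructor
    · rintro ⟨k, hk, hs⟩
      rcases (pvMap_get?_iff _ _).mp hs with ⟨hl, rfl⟩ | ⟨hl, rfl⟩ | ⟨hl, rfl⟩
      · exact Or.inl ⟨⟨k, hk, hl⟩, rfl⟩
      · exact Or.inr ⟨⟨k, hk, Or.inl hl⟩, rfl⟩
      · exact Or.inr ⟨⟨k, hk, Or.inr hl⟩, rfl⟩
    · rintro (⟨⟨k, hk, hl⟩, rfl⟩ | ⟨⟨k, hk, hl | hl⟩, rfl⟩)
      · exact ⟨k, hk, (pvMap_get?_iff _ _).mpr (Or.inl ⟨hl, rfl⟩)⟩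
      · exact ⟨k, hk, (pvMap_get?_iff _ _).mpr (Or.inr (Or.inl ⟨hl, rfl⟩))⟩
      · exact ⟨k, hk, (pvMap_get?_iff _ _).mpr (Or.inr (Or.inr ⟨hl, rfl⟩))⟩
  rw [hBside]
  by_cases hf : "fed" ∈ PySem.Set.ofList (keywords.map PySem.Str.lower) ∨
      "fomc" ∈ PySem.Set.ofList (keywords.map PySem.Str.lower)
  · rw [if_pos hf]
    have hf' := hF.mp hf
    by_cases ht : "tesla" ∈ PySem.Set.ofList (keywords.map PySem.Str.lower)
    · have ht' := hT.mp ht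
      rw [if_pos ht, PySem.Set.mem_add, PySem.Set.mem_add]
      constructor
      · rintro ((h | rfl) | rfl)
        · exact Or.inl h
        · exact Or.inr (Or.inl ⟨ht', rfl⟩)
        · exact Or.inr (Or.inr ⟨hf', rfl⟩)
      · rintro (h | ⟨_, rfl⟩ | ⟨_, rfl⟩)
        · exact Or.inl (Or.inl h)
        · exact Or.inl (Or.inr rfl)
        · exact Or.inr rfl
    · have ht' := (not_iff_not.mpr hT).mp ht
      rw [if_neg ht, PySem.Set.mem_add]
      constructor
      · rintro (h | rfl)
        · exact Or.inl h
        · exact Or.inr (Or.inr ⟨hf', rfl⟩)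
      · rintro (h | ⟨hT2, rfl⟩ | ⟨_, rfl⟩)
        · exact Or.inl h
        · exact absurd hT2 ht'
        · exact Or.inr rfl
  · rw [if_neg hf]
    have hf' := (not_iff_not.mpr hF).mp hf
    by_cases ht : "tesla" ∈ PySem.Set.ofList (keywords.map PySem.Str.lower)
    · have ht' := hT.mp ht
      rw [if_pos ht, PySem.Set.mem_add]
      constructor
      · rintro (h | rfl)
        · exact Or.inl h
        · exact Or.inr (Or.inl ⟨ht', rfl⟩)
      · rintro (h | ⟨_, rfl⟩ | ⟨hF2, rfl⟩)
        · exact Or.inl h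
        · exact Or.inr rfl
        · exact absurd hF2 hf'
    · have ht' := (not_iff_not.mpr hT).mp ht
      rw [if_neg ht]
      constructor
      · exact fun h => Or.inl h
      · rintro (h | ⟨hT2, _⟩ | ⟨hF2, _⟩)
        · exact h
        · exact absurd hT2 ht'
        · exact absurd hF2 hf'
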